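-- pv_equiv track=rewrite | github.com/SimHongSub/Algorithm | programmers/make_all_zero.py | dfs
-- ===== SOURCE A (Python) =====
-- def dfs(child, parrent, graph, a, answer):
--     for next in graph[child]:
--         if next != parrent:
--             answer = dfs(next, child, graph, a, answer)
--
--     answer += abs(a[child])
--     a[parrent] += a[child]
--     a[child] = 0
--
--     return answer
-- ===== SOURCE B (Python) =====
-- def dfs(child, parrent, graph, a, answer):
--     # Iterative post-order traversal with an explicit stack instead of recursion.
--     # Performs the same mutations on `a`, in the same order, as the recursive version.
--     stack = [(child, parrent, False)]
--     while stack: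
--         node, par, done = stack.pop()
--         if done:
--             answer += abs(a[node])
--             a[par] += a[node]
--             a[node] = 0
--         else:
--             stack.append((node, par, True))
--             for nxt in reversed(graph[node]):
--                 if nxt != par:
--                     stack.append((nxt, node, False))
--     return answer
-- ===== Notes on version B (the rewrite author's own statement) =====
-- stated objective: alternative
-- what changed: The recursive DFS is replaced by an iterative post-order traversal with an explicit stack of (node, parent, done) frames; the same three mutations on a are performed at each node's post-order moment and the answer is kept as a running accumulator.
import Mathlib
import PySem

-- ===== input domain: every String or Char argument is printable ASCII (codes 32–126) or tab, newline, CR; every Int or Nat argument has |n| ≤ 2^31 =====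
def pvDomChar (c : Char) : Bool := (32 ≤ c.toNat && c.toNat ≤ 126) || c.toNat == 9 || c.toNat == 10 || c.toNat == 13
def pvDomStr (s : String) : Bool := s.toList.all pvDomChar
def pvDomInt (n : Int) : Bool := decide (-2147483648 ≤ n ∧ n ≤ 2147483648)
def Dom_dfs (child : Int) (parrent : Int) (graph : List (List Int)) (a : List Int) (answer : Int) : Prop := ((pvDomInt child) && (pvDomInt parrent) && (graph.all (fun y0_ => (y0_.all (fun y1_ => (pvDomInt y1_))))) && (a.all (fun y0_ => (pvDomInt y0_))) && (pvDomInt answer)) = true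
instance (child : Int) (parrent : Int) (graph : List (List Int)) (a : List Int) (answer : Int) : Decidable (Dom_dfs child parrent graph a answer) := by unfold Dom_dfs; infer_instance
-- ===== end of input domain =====

-- B replaces A's recursion by an iterative post-order traversal with an explicit stack (an
-- alternative of the same cost); like A, B mutates the list `a` in place in exactly the same
-- way, and the equivalence proved here is about the return value.

-- ===== PORT A =====
-- A is recursive Python; the port threads the mutated list `a` and the answer through an
-- Option-valued helper (none = IndexError or fuel exhaustion; the fuel only totalizes the
-- recursion: under Pre_dfs the stated amount is proved sufficient).
mutual
def dfsA : Nat → Int → Int → List (List Int) → List Int → Int → Option (List Int × Int)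
  | 0, _, _, _, _, _ => none
  | f+1, child, parrent, graph, a, answer =>
    match PySem.List.pyGet? graph child with
    | none => none
    | some l =>
      match loopA f child parrent graph l a answer with
      | none => none
      | some (a1, ans1) =>
        -- answer += abs(a[child]); a[parrent] += a[child]; a[child] = 0
        match PySem.List.pyGet? a1 child with
        | none => none
        | some ac =>
          match PySem.List.pyGet? a1 parrent with
          | none => none
          | some ap =>
            match PySem.List.pySet? a1 parrent (ap + ac) with
            | none => none
            | some a2 =>
              match PySem.List.pySet? a2 child 0 with
              | none => none
              | some a3 => some (a3, ans1 + |ac|)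
termination_by f _ _ _ _ _ => (f, 0)
def loopA : Nat → Int → Int → List (List Int) → List Int → List Int → Int → Option (List Int × Int)
  | _, _, _, _, [], a, answer => some (a, answer)
  | f, child, parrent, graph, v :: vs, a, answer =>
    if v ≠ parrent then
      match dfsA f v child graph a answer with
      | none => none
      | some (a1, ans1) => loopA f child parrent graph vs a1 ans1
    else loopA f child parrent graph vs a answer
termination_by f _ _ _ l _ _ => (f, l.length + 1)
end

def dfs (child : Int) (parrent : Int) (graph : List (List Int)) (a : List Int) (answer : Int) : Int :=
  match dfsA ((graph.flatten.length + 1) * (graph.flatten.length + 1) + 1) child parrent graph a answer with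
  | some (_, ans) => ans
  | none => answer

-- ===== PORT B =====
-- B is an iterative post-order traversal with an explicit stack of (node, parent, done) frames
-- (see Source B); the while loop becomes a fuel recursion (the fuel only totalizes the loop: under
-- Pre_dfs the stated amount is proved sufficient).
def maxLen (graph : List (List Int)) : Nat :=
  graph.foldr (fun l m => max l.length m) 0

def runB : Nat → List (Int × Int × Bool) → List (List Int) → List Int → Int → Option Int
  | 0, _, _, _, _ => none
  | _+1, [], _, _, answer => some answer
  | f+1, (node, par, done) :: rest, graph, a, answer =>
    if done then
      match PySem.List.pyGet? a node with
      | none => none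
      | some an =>
        match PySem.List.pyGet? a par with
        | none => none
        | some ap =>
          match PySem.List.pySet? a par (ap + an) with
          | none => none
          | some a1 =>
            match PySem.List.pySet? a1 node 0 with
            | none => none
            | some a2 => runB f rest graph a2 (answer + |an|)
    else
      match PySem.List.pyGet? graph node with
      | none => none
      | some l =>
        runB f (l.reverse.foldl (fun st v => if v ≠ par then (v, node, false) :: st else st)
                  ((node, par, true) :: rest)) graph a answer

def dfs_alt (child : Int) (parrent : Int) (graph : List (List Int)) (a : List Int) (answer : Int) : Int :=
  match runB ((maxLen graph + 3) ^ ((graph.flatten.length + 1) * (graph.flatten.length + 1) + 1) + 1)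
      [(child, parrent, false)] graph a answer with
  | some ans => ans
  | none => answer

-- ===== PRECONDITION & SPEC =====
-- The traversal is a walk over (node, caller) states: from state s it moves to (v, s.1) for
-- every entry v of graph[s.1] other than the caller s.2.  pvReach computes the reachable
-- states (the iteration count, the number of possible states, over-saturates it).
def pvSuccs (graph : List (List Int)) (s : Int × Int) : List (Int × Int) :=
  match PySem.List.pyGet? graph s.1 with
  | none => []
  | some l => (l.filter (fun v => decide (v ≠ s.2))).map (fun v => (v, s.1))

def pvAdd (acc : List (Int × Int)) (ts : List (Int × Int)) : List (Int × Int) :=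
  ts.foldl (fun acc t => if t ∈ acc then acc else acc ++ [t]) acc

def pvExpand (graph : List (List Int)) (R : List (Int × Int)) : List (Int × Int) :=
  pvAdd R (R.flatMap (pvSuccs graph))

def pvReach (graph : List (List Int)) : Nat → List (Int × Int) → List (Int × Int)
  | 0, S => S
  | k+1, S => pvExpand graph (pvReach graph k S)

-- Every state the walk from (child, parrent) can be at lies in this list.
def pvStates (child parrent : Int) (graph : List (List Int)) : List (Int × Int) :=
  (child, parrent) ::
    graph.flatten.flatMap (fun v => (v, child) :: graph.flatten.map (fun w => (v, w)))

-- Pre_dfs is the domain on which A returns, which is inherently a reachability property of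
-- `graph` (no bounds-and-shape condition is equivalent to it): every reachable (node, caller)
-- state of the parent-skipping walk keeps its node index in range for `graph` and its node and
-- caller indices in range for `a` (Python indexing, so negative indices down to -len wrap
-- around), and no reachable state can step back to itself (otherwise the recursion never
-- terminates).  pvReach above is only the standard reflexive-transitive closure of the
-- walk-step relation, used to quantify over the reachable states; it looks at `graph` alone
-- and never at the values in `a`, the answer, or anything either port computes.
def Pre_dfs (child : Int) (parrent : Int) (graph : List (List Int)) (a : List Int) (answer : Int) : Prop :=
  (∀ s ∈ pvReach graph (pvStates child parrent graph).length [(child, parrent)],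
      (-(graph.length : Int) ≤ s.1 ∧ s.1 < (graph.length : Int)) ∧
      (-(a.length : Int) ≤ s.1 ∧ s.1 < (a.length : Int)) ∧
      (-(a.length : Int) ≤ s.2 ∧ s.2 < (a.length : Int))) ∧
  (∀ s ∈ pvReach graph (pvStates child parrent graph).length [(child, parrent)],
      ∀ t ∈ pvSuccs graph s,
      t ∈ pvReach graph (pvStates child parrent graph).length [(child, parrent)]) ∧
  (∀ s ∈ pvReach graph (pvStates child parrent graph).length [(child, parrent)],
      s ∉ pvReach graph (pvStates child parrent graph).length (pvSuccs graph s))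
instance (child : Int) (parrent : Int) (graph : List (List Int)) (a : List Int) (answer : Int) : Decidable (Pre_dfs child parrent graph a answer) := by unfold Pre_dfs; infer_instance

def pvWitness_dfs : Int × Int × List (List Int) × List Int × Int := (0, 0, [[1, 0], [2], []], [3, -4, 5], 7)

def Spec_dfs (child : Int) (parrent : Int) (graph : List (List Int)) (a : List Int) (answer : Int) (out : Int) : Prop := out = dfs_alt child parrent graph a answer
instance (child : Int) (parrent : Int) (graph : List (List Int)) (a : List Int) (answer : Int) (out : Int) : Decidable (Spec_dfs child parrent graph a answer out) := by unfold Spec_dfs; infer_instance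

-- ===== CLAIM (what is proved, stated in full; the proofs are below) =====
def Claim_equal_dfs : Prop := ∀ (child : Int) (parrent : Int) (graph : List (List Int)) (a : List Int) (answer : Int), Dom_dfs child parrent graph a answer → Pre_dfs child parrent graph a answer → Spec_dfs child parrent graph a answer (dfs child parrent graph a answer)

-- ===== LEMMAS AND PROOFS =====

theorem pyGet?_some_of_inrange {α : Type} (xs : List α) (i : Int)
    (h1 : -(xs.length : Int) ≤ i) (h2 : i < (xs.length : Int)) :
    ∃ x, PySem.List.pyGet? xs i = some x := by
  cases h : PySem.List.pyGet? xs i with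
  | some x => exact ⟨x, rfl⟩
  | none =>
    rw [PySem.List.pyGet?_eq_none_iff] at h
    exact absurd ⟨h1, h2⟩ h

theorem pySet?_some_of_inrange {α : Type} (xs : List α) (i : Int) (v : α)
    (h1 : -(xs.length : Int) ≤ i) (h2 : i < (xs.length : Int)) :
    ∃ ys, PySem.List.pySet? xs i v = some ys ∧ ys.length = xs.length := by
  cases h : PySem.List.pySet? xs i v with
  | some ys =>
    refine ⟨ys, rfl, ?_⟩
    have hd : PySem.List.pySetD xs i v = ys := by
      unfold PySem.List.pySetD
      rw [h]
      rfl
    rw [← hd]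
    exact PySem.List.length_pySetD xs i v
  | none =>
    rw [PySem.List.pySet?_eq_none_iff] at h
    exact absurd ⟨h1, h2⟩ h

-- B's reversed push loop puts the kept children, in list order, on top of the stack.
theorem revfold_eq (l : List Int) (c j : Int) (st : List (Int × Int × Bool)) :
    l.reverse.foldl (fun st v => if v ≠ c then (v, j, false) :: st else st) st
      = (l.filter (fun v => decide (v ≠ c))).map (fun v => (v, j, false)) ++ st := by
  induction l generalizing st with
  | nil => rfl
  | cons x xs ih =>
    rw [List.reverse_cons, List.foldl_append, ih]
    by_cases hx : x = c
    · have hfc : (x :: xs).filter (fun v => decide (v ≠ c)) = xs.filter (fun v => decide (v ≠ c)) := by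
        simp [hx]
      rw [hfc]
      simp [hx]
    · have hfc : (x :: xs).filter (fun v => decide (v ≠ c)) = x :: xs.filter (fun v => decide (v ≠ c)) := by
        simp [hx]
      rw [hfc]
      simp [hx]

-- membership lemmas for the closure computation
theorem mem_pvAdd_left : ∀ (ts acc : List (Int × Int)) (a : Int × Int), a ∈ acc → a ∈ pvAdd acc ts := by
  intro ts
  induction ts with
  | nil => intro acc a h; exact h
  | cons t ts ih =>
    intro acc a h
    unfold pvAdd at *
    rw [List.foldl_cons]
    by_cases ht : t ∈ acc
    · rw [if_pos ht]; exact ih acc a h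
    · rw [if_neg ht]; exact ih _ a (List.mem_append_left _ h)

theorem mem_pvAdd_right : ∀ (ts acc : List (Int × Int)) (t : Int × Int), t ∈ ts → t ∈ pvAdd acc ts := by
  intro ts
  induction ts with
  | nil => intro acc t h; cases h
  | cons u ts ih =>
    intro acc t h
    unfold pvAdd at *
    rw [List.foldl_cons]
    rcases List.mem_cons.mp h with rfl | h2
    · by_cases hu : t ∈ acc
      · rw [if_pos hu]; exact mem_pvAdd_left ts acc t hu
      · rw [if_neg hu]
        exact mem_pvAdd_left ts _ t (List.mem_append_right _ (List.mem_singleton.mpr rfl))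
    · by_cases hu : u ∈ acc
      · rw [if_pos hu]; exact ih acc t h2
      · rw [if_neg hu]; exact ih _ t h2

theorem mem_pvExpand_left (graph : List (List Int)) (R : List (Int × Int)) (s : Int × Int)
    (h : s ∈ R) : s ∈ pvExpand graph R :=
  mem_pvAdd_left _ _ _ h

theorem mem_pvExpand_step (graph : List (List Int)) (R : List (Int × Int)) (s t : Int × Int)
    (hs : s ∈ R) (ht : t ∈ pvSuccs graph s) : t ∈ pvExpand graph R :=
  mem_pvAdd_right _ _ _ (List.mem_flatMap.mpr ⟨s, hs, ht⟩)

theorem pvReach_le (graph : List (List Int)) {k k' : Nat} (h : k ≤ k')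
    {S : List (Int × Int)} {x : Int × Int} (hx : x ∈ pvReach graph k S) : x ∈ pvReach graph k' S := by
  induction k' with
  | zero =>
    have : k = 0 := by omega
    subst this
    exact hx
  | succ k' ih =>
    by_cases hk : k = k' + 1
    · subst hk; exact hx
    · exact mem_pvExpand_left graph _ x (ih (by omega))

theorem pvReach_step (graph : List (List Int)) {k : Nat} {S : List (Int × Int)} {s t : Int × Int}
    (hs : s ∈ pvReach graph k S) (ht : t ∈ pvSuccs graph s) : t ∈ pvReach graph (k + 1) S :=
  mem_pvExpand_step graph _ s t hs ht

theorem pvReach_comp (graph : List (List Int)) : ∀ (k j : Nat) (S : List (Int × Int)),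
    pvReach graph k (pvReach graph j S) = pvReach graph (j + k) S := by
  intro k
  induction k with
  | zero => intro j S; rfl
  | succ k ih =>
    intro j S
    show pvExpand graph (pvReach graph k (pvReach graph j S)) = pvReach graph (j + (k + 1)) S
    rw [ih j S]
    rfl

-- chains of walk steps
def WalkChain (graph : List (List Int)) : (Int × Int) → List (Int × Int) → Prop
  | _, [] => True
  | p, q :: l => q ∈ pvSuccs graph p ∧ WalkChain graph q l

def lastOf : (Int × Int) → List (Int × Int) → (Int × Int)
  | p, [] => p
  | _, q :: l => lastOf q l

theorem lastOf_mem : ∀ (l : List (Int × Int)) (p : Int × Int), lastOf p l ∈ p :: l := by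
  intro l
  induction l with
  | nil => intro p; exact List.mem_singleton.mpr rfl
  | cons q l ih =>
    intro p
    exact List.mem_cons_of_mem p (ih q)

theorem walkchain_last_mem (graph : List (List Int)) :
    ∀ (l : List (Int × Int)) (p : Int × Int) (S : List (Int × Int)),
    p ∈ S → WalkChain graph p l → lastOf p l ∈ pvReach graph l.length S := by
  intro l
  induction l with
  | nil => intro p S hp _; exact hp
  | cons q l ih =>
    intro p S hp hch
    obtain ⟨hq, hch'⟩ := hch
    have hq1 : q ∈ pvReach graph 1 S := pvReach_step graph (k := 0) hp hq
    have := ih q (pvReach graph 1 S) hq1 hch'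
    rw [pvReach_comp graph l.length 1 S] at this
    have e : 1 + l.length = (q :: l).length := by simp [Nat.add_comm]
    rw [e] at this
    exact this

theorem walkchain_split (graph : List (List Int)) :
    ∀ (l : List (Int × Int)) (p t : Int × Int), WalkChain graph p l → t ∈ p :: l →
    ∃ l', WalkChain graph t l' ∧ lastOf t l' = lastOf p l ∧ l'.length ≤ l.length := by
  intro l
  induction l with
  | nil =>
    intro p t _ ht
    rw [List.mem_singleton] at ht
    subst ht
    exact ⟨[], trivial, rfl, Nat.le_refl _⟩
  | cons q l ih =>
    intro p t hch ht
    obtain ⟨hq, hch'⟩ := hch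
    rcases List.mem_cons.mp ht with rfl | ht2
    · exact ⟨q :: l, ⟨hq, hch'⟩, rfl, Nat.le_refl _⟩
    · obtain ⟨l', h1, h2, h3⟩ := ih q t hch' ht2
      exact ⟨l', h1, h2, by simpa using Nat.le_succ_of_le h3⟩

theorem walkchain_snoc (graph : List (List Int)) :
    ∀ (l : List (Int × Int)) (p u : Int × Int), WalkChain graph p l → u ∈ pvSuccs graph (lastOf p l) →
    WalkChain graph p (l ++ [u]) ∧ lastOf p (l ++ [u]) = u := by
  intro l
  induction l with
  | nil =>
    intro p u _ hu
    exact ⟨⟨hu, trivial⟩, rfl⟩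
  | cons q l ih =>
    intro p u hch hu
    obtain ⟨hq, hch'⟩ := hch
    obtain ⟨h1, h2⟩ := ih q u hch' hu
    exact ⟨⟨hq, h1⟩, h2⟩

theorem walkchain_cycle (graph : List (List Int)) (t : Int × Int) (m : List (Int × Int))
    (hch : WalkChain graph t m) (hne : m ≠ []) :
    lastOf t m ∈ pvReach graph m.length (pvSuccs graph t) := by
  cases m with
  | nil => exact absurd rfl hne
  | cons m1 rest =>
    obtain ⟨h1, h2⟩ := hch
    have := walkchain_last_mem graph rest m1 (pvSuccs graph t) h1 h2
    exact pvReach_le graph (by simp) this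

-- pigeonhole
theorem nodup_subset_length {α : Type} [DecidableEq α] (P Q : List α)
    (h1 : P.Nodup) (h2 : ∀ x ∈ P, x ∈ Q) : P.length ≤ Q.length := by
  have e1 : P.toFinset.card = P.length := List.toFinset_card_of_nodup h1
  have e2 : P.toFinset ⊆ Q.toFinset := by
    intro x hx
    rw [List.mem_toFinset] at hx
    rw [List.mem_toFinset]
    exact h2 x hx
  have e3 := Finset.card_le_card e2
  have e4 : Q.toFinset.card ≤ Q.length := Q.toFinset_card_le
  omega

-- the state-space list
theorem mem_pvStates (child parrent v x : Int) (graph : List (List Int))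
    (hv : v ∈ graph.flatten) (hx : x = child ∨ x ∈ graph.flatten) :
    (v, x) ∈ pvStates child parrent graph := by
  unfold pvStates
  refine List.mem_cons_of_mem _ (List.mem_flatMap.mpr ⟨v, hv, ?_⟩)
  rcases hx with rfl | hx2
  · exact List.mem_cons_self
  · exact List.mem_cons_of_mem _ (List.mem_map.mpr ⟨x, hx2, rfl⟩)

theorem pvStates_fst (child parrent : Int) (graph : List (List Int)) (s : Int × Int)
    (h : s ∈ pvStates child parrent graph) : s.1 = child ∨ s.1 ∈ graph.flatten := by
  unfold pvStates at h
  rcases List.mem_cons.mp h with rfl | h2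
  · exact Or.inl rfl
  · obtain ⟨v, hv, hmem⟩ := List.mem_flatMap.mp h2
    rcases List.mem_cons.mp hmem with rfl | h3
    · exact Or.inr hv
    · obtain ⟨w, _, rfl⟩ := List.mem_map.mp h3
      exact Or.inr hv

theorem sum_map_const_nat {α : Type} (l : List α) (c : Nat) :
    (l.map (fun _ => c)).sum = l.length * c := by
  induction l with
  | nil => simp
  | cons x xs ih => simp [Nat.succ_mul, Nat.add_comm]

theorem maxLen_le {l : List Int} {graph : List (List Int)} (h : l ∈ graph) :
    l.length ≤ maxLen graph := by
  induction graph with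
  | nil => cases h
  | cons g gs ih =>
    rcases List.mem_cons.mp h with rfl | h2
    · exact le_max_left _ _
    · exact le_trans (ih h2) (le_max_right _ _)

-- A's recursion succeeds on every state Pre_dfs certifies.
theorem dfsA_success
    (graph : List (List Int)) (child parrent : Int) (la : Nat)
    (HV : ∀ s ∈ pvReach graph (pvStates child parrent graph).length [(child, parrent)],
        (-(graph.length : Int) ≤ s.1 ∧ s.1 < (graph.length : Int)) ∧
        (-(la : Int) ≤ s.1 ∧ s.1 < (la : Int)) ∧
        (-(la : Int) ≤ s.2 ∧ s.2 < (la : Int)))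
    (HC : ∀ s ∈ pvReach graph (pvStates child parrent graph).length [(child, parrent)],
        ∀ t ∈ pvSuccs graph s,
        t ∈ pvReach graph (pvStates child parrent graph).length [(child, parrent)])
    (HA : ∀ s ∈ pvReach graph (pvStates child parrent graph).length [(child, parrent)],
        s ∉ pvReach graph (pvStates child parrent graph).length (pvSuccs graph s)) :
    ∀ (f : Nat) (x c : Int) (P : List (Int × Int)) (a : List Int) (ans : Int),
      a.length = la →
      WalkChain graph (child, parrent) P →
      lastOf (child, parrent) P = (x, c) →
      ((child, parrent) :: P).Nodup →
      (∀ p ∈ (child, parrent) :: P,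
          p ∈ pvReach graph (pvStates child parrent graph).length [(child, parrent)]) →
      (∀ p ∈ (child, parrent) :: P, p ∈ pvStates child parrent graph) →
      (pvStates child parrent graph).length - ((child, parrent) :: P).length ≤ f →
      ∃ a' ans', dfsA (f + 1) x c graph a ans = some (a', ans') ∧ a'.length = la := by
  intro f
  induction f using Nat.strong_induction_on with
  | _ f IH =>
  intro x c P a ans haL hchain hlast hnodup hRC hSL hfuel
  have hsR : (x, c) ∈ pvReach graph (pvStates child parrent graph).length [(child, parrent)] := by
    rw [← hlast]
    exact hRC _ (lastOf_mem P (child, parrent))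
  have hsSL : (x, c) ∈ pvStates child parrent graph := by
    rw [← hlast]
    exact hSL _ (lastOf_mem P (child, parrent))
  obtain ⟨hvg, hva, hvc2⟩ := HV _ hsR
  obtain ⟨l, hget⟩ := pyGet?_some_of_inrange graph x hvg.1 hvg.2
  have hlg : l ∈ graph := PySem.List.mem_of_pyGet?_eq_some _ hget
  have hsuccs_eq : pvSuccs graph (x, c)
      = (l.filter (fun v => decide (v ≠ c))).map (fun v => (v, x)) := by
    unfold pvSuccs
    rw [hget]
  -- the loop over the child list
  have hloopC : ∀ vs : List Int, (∀ v ∈ vs, v ∈ l) →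
      ∀ (a1 : List Int) (ans1 : Int), a1.length = la →
      ∃ a2 ans2, loopA f x c graph vs a1 ans1 = some (a2, ans2) ∧ a2.length = la := by
    intro vs
    induction vs with
    | nil =>
      intro _ a1 ans1 h
      exact ⟨a1, ans1, by simp [loopA], h⟩
    | cons v vs ihv =>
      intro hmem a1 ans1 ha1
      by_cases hvc : v = c
      · refine ?_
        obtain ⟨a2, ans2, hrun, hlen⟩ := ihv (fun w hw => hmem w (List.mem_cons_of_mem v hw)) a1 ans1 ha1
        refine ⟨a2, ans2, ?_, hlen⟩
        simp only [loopA, hvc, ne_eq, not_true_eq_false, if_false]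
        exact hrun
      · -- the new state t = (v, x)
        have ht : (v, x) ∈ pvSuccs graph (x, c) := by
          rw [hsuccs_eq]
          exact List.mem_map.mpr ⟨v, List.mem_filter.mpr ⟨hmem v List.mem_cons_self, decide_eq_true hvc⟩, rfl⟩
        have htR := HC _ hsR _ ht
        have htSL : (v, x) ∈ pvStates child parrent graph := by
          refine mem_pvStates child parrent v x graph (List.mem_flatten.mpr ⟨l, hlg, hmem v List.mem_cons_self⟩) ?_
          exact pvStates_fst child parrent graph (x, c) hsSL
        have htnotin : (v, x) ∉ (child, parrent) :: P := by
          intro htin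
          obtain ⟨l', hch', hlast', hlen'⟩ := walkchain_split graph P (child, parrent) (v, x) hchain htin
          have hstep : (v, x) ∈ pvSuccs graph (lastOf (v, x) l') := by
            rw [hlast', hlast]
            exact ht
          obtain ⟨hch2, hlast2⟩ := walkchain_snoc graph l' (v, x) (v, x) hch' hstep
          have hcyc := walkchain_cycle graph (v, x) (l' ++ [(v, x)]) hch2 (by simp)
          rw [hlast2] at hcyc
          have hplen : ((child, parrent) :: P).length ≤ (pvStates child parrent graph).length :=
            nodup_subset_length _ _ hnodup hSL
          have hle : (l' ++ [(v, x)]).length ≤ (pvStates child parrent graph).length := by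
            rw [List.length_append]
            simp only [List.length_cons] at hplen
            simp
            omega
          exact HA _ htR (pvReach_le graph hle hcyc)
        have hextnodup : (((child, parrent) :: P) ++ [(v, x)]).Nodup := by
          rw [List.nodup_append]
          refine ⟨hnodup, List.nodup_singleton _, ?_⟩
          intro p hp q hq
          rw [List.mem_singleton] at hq
          subst hq
          intro hpq
          exact htnotin (hpq ▸ hp)
        have hextSL : ∀ p ∈ ((child, parrent) :: P) ++ [(v, x)], p ∈ pvStates child parrent graph := by
          intro p hp
          rcases List.mem_append.mp hp with hp1 | hp2
          · exact hSL p hp1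
          · rw [List.mem_singleton] at hp2
            subst hp2
            exact htSL
        have hextlen : (((child, parrent) :: P) ++ [(v, x)]).length ≤ (pvStates child parrent graph).length :=
          nodup_subset_length _ _ hextnodup hextSL
        have hf1 : 1 ≤ f := by
          simp only [List.length_append, List.length_cons] at hextlen hfuel ⊢
          omega
        obtain ⟨f', rfl⟩ : ∃ f', f = f' + 1 := ⟨f - 1, by omega⟩
        obtain ⟨hch3, hlast3⟩ := walkchain_snoc graph P (child, parrent) (v, x) hchain (by rw [hlast]; exact ht)
        have hextnodup' : ((child, parrent) :: (P ++ [(v, x)])).Nodup := by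
          rw [← List.cons_append]
          exact hextnodup
        obtain ⟨a2, ans2, hda, hlen2⟩ := IH f' (by omega) v x (P ++ [(v, x)]) a1 ans1 ha1 hch3 hlast3
          hextnodup'
          (by
            intro p hp
            rw [← List.cons_append] at hp
            rcases List.mem_append.mp hp with hp1 | hp2
            · exact hRC p hp1
            · rw [List.mem_singleton] at hp2
              subst hp2
              exact htR)
          (by
            intro p hp
            rw [← List.cons_append] at hp
            exact hextSL p hp)
          (by
            simp only [List.length_cons, List.length_append] at hfuel hextlen ⊢
            omega)
        obtain ⟨a3, ans3, hloop, hlen3⟩ := ihv (fun w hw => hmem w (List.mem_cons_of_mem v hw)) a2 ans2 hlen2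
        refine ⟨a3, ans3, ?_, hlen3⟩
        simp only [loopA, hvc, ne_eq, not_false_eq_true, if_true, hda]
        exact hloop
  obtain ⟨a1, ans1, hloop, hlen1⟩ := hloopC l (fun _ h => h) a ans haL
  obtain ⟨ac, hac⟩ := pyGet?_some_of_inrange a1 x (by rw [hlen1]; exact hva.1) (by rw [hlen1]; exact hva.2)
  obtain ⟨ap, hap⟩ := pyGet?_some_of_inrange a1 c (by rw [hlen1]; exact hvc2.1) (by rw [hlen1]; exact hvc2.2)
  obtain ⟨a2, hset1, hlen2⟩ := pySet?_some_of_inrange a1 c (ap + ac) (by rw [hlen1]; exact hvc2.1) (by rw [hlen1]; exact hvc2.2)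
  obtain ⟨a3, hset2, hlen3⟩ := pySet?_some_of_inrange a2 x 0 (by rw [hlen2, hlen1]; exact hva.1) (by rw [hlen2, hlen1]; exact hva.2)
  refine ⟨a3, ans1 + |ac|, ?_, by rw [hlen3, hlen2, hlen1]⟩
  simp only [dfsA, hget, hloop, hac, hap, hset1, hset2]

-- Whenever A's recursion returns, B's stack machine pops k frames doing exactly the same
-- reads, writes and answer updates, for a k strictly below B's fuel.
theorem sim_runB :
    ∀ (f : Nat) (graph : List (List Int)) (j c : Int) (a : List Int) (ans : Int)
      (a' : List Int) (ans' : Int),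
      dfsA f j c graph a ans = some (a', ans') →
      ∃ k : Nat, k + 1 ≤ (maxLen graph + 3) ^ f ∧
        ∀ (g : Nat) (rest : List (Int × Int × Bool)),
          runB (g + k) ((j, c, false) :: rest) graph a ans = runB g rest graph a' ans' := by
  intro f
  induction f using Nat.strong_induction_on with
  | _ f IH =>
  intro graph j c a ans a' ans' hsucc
  cases f with
  | zero => simp [dfsA] at hsucc
  | succ f' =>
    simp only [dfsA] at hsucc
    cases hga : PySem.List.pyGet? graph j with
    | none => rw [hga] at hsucc; simp at hsucc
    | some l =>
    simp only [hga] at hsucc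
    cases hlo : loopA f' j c graph l a ans with
    | none => rw [hlo] at hsucc; simp at hsucc
    | some p =>
    obtain ⟨a1, ans1⟩ := p
    simp only [hlo] at hsucc
    cases hac : PySem.List.pyGet? a1 j with
    | none => rw [hac] at hsucc; simp at hsucc
    | some ac =>
    simp only [hac] at hsucc
    cases hap : PySem.List.pyGet? a1 c with
    | none => rw [hap] at hsucc; simp at hsucc
    | some ap =>
    simp only [hap] at hsucc
    cases hs1 : PySem.List.pySet? a1 c (ap + ac) with
    | none => rw [hs1] at hsucc; simp at hsucc
    | some a2 =>
    simp only [hs1] at hsucc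
    cases hs2 : PySem.List.pySet? a2 j 0 with
    | none => rw [hs2] at hsucc; simp at hsucc
    | some a3 =>
    simp only [hs2] at hsucc
    have hpair := Option.some.inj hsucc
    have h1 : a3 = a' := congrArg Prod.fst hpair
    have h2 : ans1 + |ac| = ans' := congrArg Prod.snd hpair
    subst h1
    subst h2
    -- the loop simulation
    have loopS : ∀ (vs : List Int) (b1 : List Int) (bs1 : Int) (b2 : List Int) (bs2 : Int),
        loopA f' j c graph vs b1 bs1 = some (b2, bs2) →
        ∃ kL : Nat, kL ≤ vs.length * ((maxLen graph + 3) ^ f' - 1) ∧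
          ∀ (g : Nat) (rest : List (Int × Int × Bool)),
            runB (g + kL)
                ((vs.filter (fun v => decide (v ≠ c))).map (fun v => (v, j, false)) ++ rest)
                graph b1 bs1
              = runB g rest graph b2 bs2 := by
      intro vs
      induction vs with
      | nil =>
        intro b1 bs1 b2 bs2 h
        simp only [loopA, Option.some.injEq, Prod.mk.injEq] at h
        obtain ⟨rfl, rfl⟩ := h
        exact ⟨0, by simp, fun g rest => by simp⟩
      | cons v vs ihv =>
        intro b1 bs1 b2 bs2 h
        by_cases hvc : v = c
        · simp only [loopA, hvc, ne_eq, not_true_eq_false, if_false] at h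
          obtain ⟨kL, hb, hsim⟩ := ihv b1 bs1 b2 bs2 h
          refine ⟨kL, le_trans hb (Nat.mul_le_mul_right _ (by simp)), ?_⟩
          intro g rest
          have hfc : (v :: vs).filter (fun w => decide (w ≠ c)) = vs.filter (fun w => decide (w ≠ c)) := by
            simp [hvc]
          rw [hfc]
          exact hsim g rest
        · simp only [loopA, hvc, ne_eq, not_false_eq_true, if_true] at h
          cases hda : dfsA f' v j graph b1 bs1 with
          | none => rw [hda] at h; simp at h
          | some q =>
          rw [hda] at h
          obtain ⟨qa, qb⟩ := q
          obtain ⟨kv, hkv, hsimv⟩ := IH f' (by omega) graph v j b1 bs1 qa qb hda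
          obtain ⟨kL, hkL, hsimL⟩ := ihv qa qb b2 bs2 h
          refine ⟨kv + kL, ?_, ?_⟩
          · have h1 : kv ≤ (maxLen graph + 3) ^ f' - 1 := by omega
            have h2 : kv + kL ≤ ((maxLen graph + 3) ^ f' - 1) + vs.length * ((maxLen graph + 3) ^ f' - 1) :=
              Nat.add_le_add h1 hkL
            have h3 : ((maxLen graph + 3) ^ f' - 1) + vs.length * ((maxLen graph + 3) ^ f' - 1)
                = (v :: vs).length * ((maxLen graph + 3) ^ f' - 1) := by
              simp [List.length_cons, Nat.succ_mul, Nat.add_comm]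
            omega
          · intro g rest
            have hfc : (v :: vs).filter (fun w => decide (w ≠ c)) = v :: vs.filter (fun w => decide (w ≠ c)) := by
              simp [hvc]
            rw [hfc, List.map_cons, List.cons_append]
            have e1 : g + (kv + kL) = (g + kL) + kv := by omega
            rw [e1, hsimv, hsimL]
    obtain ⟨kL, hkL, hsimL⟩ := loopS l a ans a1 ans1 hlo
    refine ⟨kL + 2, ?_, ?_⟩
    · -- kL + 3 ≤ (maxLen graph + 3) ^ (f' + 1)
      have hml : l.length ≤ maxLen graph := maxLen_le (PySem.List.mem_of_pyGet?_eq_some _ hga)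
      have hX : 1 ≤ (maxLen graph + 3) ^ f' := Nat.one_le_pow _ _ (by omega)
      have h1 : kL ≤ maxLen graph * ((maxLen graph + 3) ^ f' - 1) :=
        le_trans hkL (Nat.mul_le_mul_right _ hml)
      have h2 : maxLen graph * ((maxLen graph + 3) ^ f' - 1) ≤ maxLen graph * (maxLen graph + 3) ^ f' :=
        Nat.mul_le_mul_left _ (Nat.sub_le _ _)
      have h3 : (maxLen graph + 3) ^ (f' + 1)
          = maxLen graph * (maxLen graph + 3) ^ f' + 3 * (maxLen graph + 3) ^ f' := by
        rw [pow_succ]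
        ring
      omega
    · intro g rest
      have hstep1 : ∀ (m : Nat) (rest' : List (Int × Int × Bool)),
          runB (m + 1) ((j, c, false) :: rest') graph a ans
            = runB m ((l.filter (fun v => decide (v ≠ c))).map (fun v => (v, j, false))
                ++ ((j, c, true) :: rest')) graph a ans := by
        intro m rest'
        simp only [runB, Bool.false_eq_true, if_false, hga, revfold_eq]
      have hstep2 : ∀ (m : Nat) (rest' : List (Int × Int × Bool)),
          runB (m + 1) ((j, c, true) :: rest') graph a1 ans1
            = runB m rest' graph a3 (ans1 + |ac|) := by
        intro m rest'
        simp only [runB, if_true, hac, hap, hs1, hs2]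
      have e1 : g + (kL + 2) = (((g + 1) + kL) + 1) := by omega
      rw [e1, hstep1, hsimL (g + 1) ((j, c, true) :: rest), hstep2]

-- ===== VERDICT (by name: the statement is the Claim_ definition above) =====
theorem dfs_spec : Claim_equal_dfs := by
  unfold Claim_equal_dfs
  intro child parrent graph a answer hdom hpre
  unfold Spec_dfs
  obtain ⟨HV, HC, HA⟩ := hpre
  have hstlen : (pvStates child parrent graph).length
      = graph.flatten.length * (graph.flatten.length + 1) + 1 := by
    unfold pvStates
    rw [List.length_cons, List.length_flatMap]
    have e : graph.flatten.map (fun v => ((v, child) :: graph.flatten.map (fun w => (v, w))).length)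
        = graph.flatten.map (fun _ => graph.flatten.length + 1) := by
      apply List.map_congr_left
      intro v _
      simp only [List.length_cons, List.length_map]
    rw [e, sum_map_const_nat]
  have hrootR : (child, parrent) ∈ pvReach graph (pvStates child parrent graph).length [(child, parrent)] :=
    pvReach_le graph (Nat.zero_le _) (List.mem_singleton.mpr rfl)
  obtain ⟨a', ans', hda, hlen⟩ :=
    dfsA_success graph child parrent a.length HV HC HA
      ((graph.flatten.length + 1) * (graph.flatten.length + 1)) child parrent [] a answer rfl
      trivial rfl (by simp)
      (by
        intro p hp
        rw [List.mem_singleton] at hp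
        subst hp
        exact hrootR)
      (by
        intro p hp
        rw [List.mem_singleton] at hp
        subst hp
        exact List.mem_cons_self)
      (by
        rw [hstlen]
        have hm : graph.flatten.length * (graph.flatten.length + 1)
            ≤ (graph.flatten.length + 1) * (graph.flatten.length + 1) :=
          Nat.mul_le_mul_right _ (by omega)
        simp only [List.length_cons, List.length_nil]
        omega)
  obtain ⟨k, hk, hsim⟩ :=
    sim_runB ((graph.flatten.length + 1) * (graph.flatten.length + 1) + 1) graph child parrent a answer a' ans' hda
  unfold dfs dfs_alt
  rw [hda]
  obtain ⟨m, hm⟩ : ∃ m, (maxLen graph + 3) ^ ((graph.flatten.length + 1) * (graph.flatten.length + 1) + 1) + 1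
      = (m + 1) + k :=
    ⟨(maxLen graph + 3) ^ ((graph.flatten.length + 1) * (graph.flatten.length + 1) + 1) - k, by omega⟩
  rw [hm, hsim (m + 1) []]
  simp [runB]
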